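-- pv_equiv track=rewrite | github.com/seemoo-lab/myo-keylogging | record/utils.py | split_file_content
-- ===== SOURCE A (Python) =====
-- def split_file_content(file_content, offset=False):
-- 	"""
-- 	Parse the given file content (split at empty line).
-- 	Offset will ignore a header above each text sample.
-- 	"""
-- 	extracts = []
-- 	start = 1 if offset else 0
-- 	for end, text in enumerate(file_content):
-- 		if text == "":
-- 			extracts.append(file_content[start:end])
-- 			start = end + 2 if offset else end + 1
-- 	rest = file_content[start:]
-- 	if rest:
-- 		extracts.append(rest)
-- 	return extracts
-- ===== SOURCE B (Python) =====
-- def split_file_content(file_content, offset=False):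
-- 	"""
-- 	Parse the given file content (split at empty line).
-- 	Offset will ignore a header above each text sample.
-- 	"""
-- 	extracts = []
-- 	current = []
-- 	skip = 1 if offset else 0
-- 	for text in file_content:
-- 		if text == "":
-- 			extracts.append(current)
-- 			current = []
-- 			skip = 1 if offset else 0
-- 		elif skip:
-- 			skip -= 1
-- 		else:
-- 			current.append(text)
-- 	if current:
-- 		extracts.append(current)
-- 	return extracts
-- ===== Notes on version B (the rewrite author's own statement) =====
-- stated objective: simpler
-- what changed: Replaces A's start-index bookkeeping with list slicing by a single accumulator pass: a `current` segment list flushed at each empty line, with a skip counter dropping the header line when offset is set.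
import Mathlib
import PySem

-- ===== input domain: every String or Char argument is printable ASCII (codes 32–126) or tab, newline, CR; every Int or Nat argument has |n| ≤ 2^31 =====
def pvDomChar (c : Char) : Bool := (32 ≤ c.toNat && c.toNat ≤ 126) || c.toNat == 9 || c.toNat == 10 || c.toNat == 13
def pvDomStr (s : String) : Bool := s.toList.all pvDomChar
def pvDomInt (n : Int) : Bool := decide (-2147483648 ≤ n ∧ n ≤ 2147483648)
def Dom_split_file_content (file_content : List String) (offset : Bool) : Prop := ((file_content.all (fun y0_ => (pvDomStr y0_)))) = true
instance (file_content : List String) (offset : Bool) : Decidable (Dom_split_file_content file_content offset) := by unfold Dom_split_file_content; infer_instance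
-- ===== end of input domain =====

-- B replaces A's start-index + slicing strategy by a single accumulator pass with a header-skip counter (objective: simpler).

-- ===== PORT A =====
-- A's 'for end, text in enumerate(file_content)' loop: structural recursion over the
-- remaining lines carrying the running index `i` and the state (extracts, start).
def splitA_loop (fc : List String) (offset : Bool) :
    List String → Nat → List (List String) × Nat → List (List String) × Nat
  | [], _, st => st
  | t :: rest, i, (ext, start) =>
    if t = "" then
      splitA_loop fc offset rest (i + 1)
        (ext ++ [PySem.List.slice fc (some (start : Int)) (some (i : Int))],
         if offset then i + 2 else i + 1)
    else
      splitA_loop fc offset rest (i + 1) (ext, start)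

def split_file_content (file_content : List String) (offset : Bool) : List (List String) :=
  let start0 : Nat := if offset then 1 else 0
  let st := splitA_loop file_content offset file_content 0 ([], start0)
  let rest := PySem.List.slice file_content (some (st.2 : Int)) none
  if rest ≠ [] then st.1 ++ [rest] else st.1

-- ===== PORT B =====
-- B's loop: state (extracts, current, skip).
def splitB_loop (offset : Bool) :
    List String → List (List String) × List String × Nat → List (List String) × List String
  | [], (ext, cur, _) => (ext, cur)
  | t :: rest, (ext, cur, skip) =>
    if t = "" then
      splitB_loop offset rest (ext ++ [cur], [], if offset then 1 else 0)
    else if skip ≠ 0 then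
      splitB_loop offset rest (ext, cur, skip - 1)
    else
      splitB_loop offset rest (ext, cur ++ [t], skip)

def split_file_content_alt (file_content : List String) (offset : Bool) : List (List String) :=
  let st := splitB_loop offset file_content ([], [], if offset then 1 else 0)
  if st.2 ≠ [] then st.1 ++ [st.2] else st.1

-- ===== PRECONDITION & SPEC =====
def Spec_split_file_content (file_content : List String) (offset : Bool) (out : List (List String)) : Prop := out = split_file_content_alt file_content offset
instance (file_content : List String) (offset : Bool) (out : List (List String)) : Decidable (Spec_split_file_content file_content offset out) := by unfold Spec_split_file_content; infer_instance

-- ===== CLAIM (what is proved, stated in full; the proofs are below) =====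
def Claim_equal_split_file_content : Prop := ∀ (file_content : List String) (offset : Bool), Dom_split_file_content file_content offset → Spec_split_file_content file_content offset (split_file_content file_content offset)

-- ===== LEMMAS AND PROOFS =====

-- Relation between A's (start) and B's (cur, skip) at position i of fc:
-- either skip = 0, start ≤ i and cur = fc[start:i], or (offset) skip = 1, start = i + 1, cur = [].
def pvInv (fc : List String) (offset : Bool) (i start : Nat) (cur : List String) (skip : Nat) : Prop :=
  (skip = 0 ∧ start ≤ i ∧ cur = (fc.drop start).take (i - start)) ∨
  (offset = true ∧ skip = 1 ∧ start = i + 1 ∧ cur = [])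

lemma slice_eq_of_inv (fc : List String) (offset : Bool) (i start : Nat) (cur : List String)
    (skip : Nat) (h : pvInv fc offset i start cur skip) :
    PySem.List.slice fc (some (start : Int)) (some (i : Int)) = cur := by
  rw [PySem.List.slice_natCast]
  rcases h with ⟨_, _, hc⟩ | ⟨_, _, hs, hc⟩
  · exact hc.symm
  · subst hs hc
    simp

lemma take_succ_of_drop (fc : List String) (start i : Nat) (t : String)
    (hle : start ≤ i) (ht : fc.drop i = t :: (fc.drop (i + 1))) :
    (fc.drop start).take (i + 1 - start) = (fc.drop start).take (i - start) ++ [t] := by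
  have hi : i < fc.length := by
    by_contra h
    simp [List.drop_eq_nil_of_le (Nat.le_of_not_lt h)] at ht
  have hget : fc[i] = t := by
    have h0 : fc[i]? = some t := by
      have := congrArg (fun l => l[0]?) ht
      simpa [List.getElem?_drop] using this
    have := List.getElem?_eq_getElem hi (l := fc)
    rw [this] at h0
    exact Option.some.inj h0
  have h1 : i + 1 - start = (i - start) + 1 := by omega
  rw [h1, List.take_add_one]
  have : (fc.drop start)[i - start]? = some t := by
    rw [List.getElem?_drop]
    have : start + (i - start) = i := by omega
    rw [this, List.getElem?_eq_getElem hi, hget]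
  simp [this]

lemma loop_eq (fc : List String) (offset : Bool) :
    ∀ (l : List String) (i start : Nat) (ext : List (List String)) (cur : List String) (skip : Nat),
    fc.drop i = l → pvInv fc offset i start cur skip →
    (splitA_loop fc offset l i (ext, start)).1 = (splitB_loop offset l (ext, cur, skip)).1 ∧
    pvInv fc offset (i + l.length) (splitA_loop fc offset l i (ext, start)).2
      (splitB_loop offset l (ext, cur, skip)).2 (if offset then 1 else 0) ∨
    (splitA_loop fc offset l i (ext, start)).1 = (splitB_loop offset l (ext, cur, skip)).1 ∧
    pvInv fc offset (i + l.length) (splitA_loop fc offset l i (ext, start)).2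
      (splitB_loop offset l (ext, cur, skip)).2 0 := by
  intro l
  induction l with
  | nil =>
    intro i start ext cur skip hdrop hinv
    rcases hinv with ⟨h0, hle, hc⟩ | hoff
    · right; exact ⟨rfl, Or.inl ⟨rfl, by simpa using hle, by simpa using hc⟩⟩
    · left
      constructor
      · rfl
      · right
        refine ⟨hoff.1, ?_, by simpa using hoff.2.2.1, hoff.2.2.2⟩
        simp [hoff.1]
  | cons t rest ih =>
    intro i start ext cur skip hdrop hinv
    have hrest : fc.drop (i + 1) = rest := by
      have := congrArg List.tail hdrop
      simpa [List.tail_drop] using this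
    have hlen : i + (t :: rest).length = i + 1 + rest.length := by
      simp; omega
    by_cases ht : t = ""
    · subst ht
      have hsl := slice_eq_of_inv fc offset i start cur skip hinv
      have hinv2 : pvInv fc offset (i + 1) (if offset then i + 2 else i + 1) []
          (if offset then 1 else 0) := by
        cases offset
        · left; simp
        · right; simp
      have key := ih (i + 1) (if offset then i + 2 else i + 1) (ext ++ [cur]) []
        (if offset then 1 else 0) hrest hinv2
      rw [hlen]
      simp only [splitA_loop, splitB_loop, hsl]
      exact key
    · rcases hinv with ⟨h0, hle, hc⟩ | ⟨ho, h1, hs, hc⟩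
      · subst h0
        have hinv2 : pvInv fc offset (i + 1) start (cur ++ [t]) 0 := by
          left
          refine ⟨rfl, by omega, ?_⟩
          rw [hc]
          exact (take_succ_of_drop fc start i t hle (hrest ▸ hdrop)).symm
        have key := ih (i + 1) start ext (cur ++ [t]) 0 hrest hinv2
        rw [hlen]
        simp only [splitA_loop, splitB_loop, if_neg ht, ne_eq, not_true_eq_false]
        exact key
      · subst h1 hs hc
        have hinv2 : pvInv fc offset (i + 1) (i + 1) [] 0 := by
          left; exact ⟨rfl, by omega, by simp⟩
        have key := ih (i + 1) (i + 1) ext [] 0 hrest hinv2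
        rw [hlen]
        simp only [splitA_loop, splitB_loop, if_neg ht, ne_eq,
          if_pos (by simp : (1 : Nat) ≠ 0)]
        exact key

lemma rest_eq (fc : List String) (offset : Bool) (i start : Nat) (cur : List String)
    (sk : Nat) (hi : i = fc.length) (h : pvInv fc offset i start cur sk) :
    PySem.List.slice fc (some (start : Int)) none = cur := by
  rw [PySem.List.slice_from_natCast]
  rcases h with ⟨_, hle, hc⟩ | ⟨_, _, hs, hc⟩
  · subst hc hi
    exact (List.take_of_length_le (by simp)).symm
  · subst hc
    apply List.drop_eq_nil_of_le
    omega

-- ===== VERDICT (by name: the statement is the Claim_ definition above) =====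
theorem split_file_content_spec : Claim_equal_split_file_content := by
  intro fc offset _
  unfold Spec_split_file_content
  simp only [split_file_content, split_file_content_alt]
  have hinv : pvInv fc offset 0 (if offset then 1 else 0) [] (if offset then 1 else 0) := by
    cases offset
    · left; simp
    · right; simp
  have h := loop_eq fc offset fc 0 (if offset then 1 else 0) [] [] (if offset then 1 else 0)
    (by simp) hinv
  rcases h with ⟨hext, hinv'⟩ | ⟨hext, hinv'⟩ <;>
    rw [rest_eq fc offset _ _ _ _ (by simp) hinv', hext]
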